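-- pv_equiv track=rewrite | github.com/small-goliath/baekjoon | python/sliding-window.py | solution
-- ===== SOURCE A (Python) =====
-- from bisect import bisect_right
--
-- def solution(exercise_list: list, exercise_time: int) -> int:
--     exercise_length = len(exercise_list)
--     total = sum(exercise_list)
--
--     if exercise_time >= total:
--         return exercise_length
--
--     extended_exercise_list = [0] * (2 * exercise_length + 1)
--     for i in range(exercise_length):
--         extended_exercise_list[i + 1] = extended_exercise_list[i] + exercise_list[i]
--
--     for i in range(exercise_length + 1, 2 * exercise_length + 1):
--         extended_exercise_list[i] = extended_exercise_list[i - exercise_length] + total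
--
--     max_exercise = 0
--     for i in range(exercise_length):
--         exercise = extended_exercise_list[i]
--         minute = exercise_list[i]
--
--         for off in range(minute):
--             left = exercise + off
--             light = left + exercise_time
--
--             j = bisect_right(extended_exercise_list[i:i + (exercise_length + 1)], light - 1) + i - 1
--             if j > i + exercise_length:
--                 j = i + exercise_length
--
--             count = j - i + 1
--             if count > exercise_length:
--                 count = exercise_length
--
--             max_exercise = max(max_exercise, count)
--             if max_exercise == exercise_length:
--                 break
--
--         if max_exercise == exercise_length:
--             break
--
--     return max_exercise
-- ===== SOURCE B (Python) =====
-- from bisect import bisect_right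
--
-- def solution(exercise_list: list, exercise_time: int) -> int:
--     n = len(exercise_list)
--     total = sum(exercise_list)
--     if exercise_time >= total:
--         return n
--     ext = [0] * (2 * n + 1)
--     for i in range(n):
--         ext[i + 1] = ext[i] + exercise_list[i]
--     for i in range(n + 1, 2 * n + 1):
--         ext[i] = ext[i - n] + total
--     best = 0
--     for i, m in enumerate(exercise_list):
--         if m <= 0:
--             continue
--         # count is monotone in the start offset, so only off = m-1 matters
--         light = ext[i] + (m - 1) + exercise_time
--         cnt = bisect_right(ext, light - 1, i, i + n + 1) - i
--         best = max(best, min(cnt, n))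
--     return best
-- ===== Notes on version B (the rewrite author's own statement) =====
-- stated objective: alternative
-- what changed: B drops A's inner loop over every start offset 0..minute-1: the number of covered exercises is monotone in the offset, so B evaluates only the last offset minute-1 per element, and it bisects the extended prefix array with lo/hi bounds instead of materialising a slice; the break-on-maximum bookkeeping disappears.
import Mathlib
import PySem

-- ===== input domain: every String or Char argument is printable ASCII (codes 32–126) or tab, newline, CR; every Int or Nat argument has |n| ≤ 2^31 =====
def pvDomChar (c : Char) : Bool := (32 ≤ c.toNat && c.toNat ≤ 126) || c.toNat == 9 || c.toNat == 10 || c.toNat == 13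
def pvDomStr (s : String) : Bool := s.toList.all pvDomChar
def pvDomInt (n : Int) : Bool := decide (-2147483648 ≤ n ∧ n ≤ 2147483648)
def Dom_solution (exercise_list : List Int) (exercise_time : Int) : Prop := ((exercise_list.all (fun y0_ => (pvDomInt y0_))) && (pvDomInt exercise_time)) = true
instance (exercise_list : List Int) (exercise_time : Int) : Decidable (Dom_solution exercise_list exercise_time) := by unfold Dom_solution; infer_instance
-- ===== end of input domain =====

-- B replaces A's inner loop over all offsets 0..minute-1 by the single offset minute-1
-- (the covered count is monotone in the offset) and bisects with lo/hi bounds instead of slicing.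

-- ===== PORT A =====
-- shared helper: Python's bisect.bisect_right(a, x, lo, hi); both Pythons call this library function
def pyBisectRight (a : List Int) (x : Int) (lo hi : Nat) : Nat :=
  if _h : lo < hi then
    if x < a.getD ((lo + hi) / 2) 0 then pyBisectRight a x lo ((lo + hi) / 2)
    else pyBisectRight a x ((lo + hi) / 2 + 1) hi
  else lo
termination_by hi - lo
decreasing_by all_goals omega

-- shared helper: the two prefix-sum loops building extended_exercise_list (line-identical in A and B)
def buildExt (l : List Int) (total : Int) : List Int :=
  let n := l.length
  let e0 : List Int := List.replicate (2 * n + 1) 0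
  let e1 := (List.range n).foldl (fun e i => e.set (i + 1) (e.getD i 0 + l.getD i 0)) e0
  (List.range' (n + 1) n).foldl (fun e i => e.set i (e.getD (i - n) 0 + total)) e1

-- A's inner loop 'for off in range(minute)' with its break
def solutionInner (ext : List Int) (i n : Nat) (exercise t : Int) : List Int → Int → Int
  | [], m => m
  | off :: offs, m =>
    let s := PySem.List.slice ext (some (i : Int)) (some ((i : Int) + ((n : Int) + 1)))
    let left := exercise + off
    let light := left + t
    let j : Int := (pyBisectRight s (light - 1) 0 s.length : Int) + i - 1
    let j := if j > (i : Int) + n then (i : Int) + n else j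
    let count := j - i + 1
    let count := if count > (n : Int) then (n : Int) else count
    let m' := max m count
    if m' = (n : Int) then m' else solutionInner ext i n exercise t offs m'

-- A's outer loop 'for i in range(exercise_length)' with its break
def solutionOuter (l ext : List Int) (t : Int) (n : Nat) : List Nat → Int → Int
  | [], m => m
  | i :: is, m =>
    let exercise := ext.getD i 0
    let minute := l.getD i 0
    let m' := solutionInner ext i n exercise t (PySem.List.pyRange 0 minute 1) m
    if m' = (n : Int) then m' else solutionOuter l ext t n is m'

def solution (exercise_list : List Int) (exercise_time : Int) : Int :=
  let n := exercise_list.length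
  let total := exercise_list.sum
  if exercise_time ≥ total then (n : Int)
  else
    let ext := buildExt exercise_list total
    solutionOuter exercise_list ext exercise_time n (List.range n) 0

-- ===== PORT B =====
def solution_alt (exercise_list : List Int) (exercise_time : Int) : Int :=
  let n := exercise_list.length
  let total := exercise_list.sum
  if exercise_time ≥ total then (n : Int)
  else
    let ext := buildExt exercise_list total
    (PySem.List.enumerate exercise_list 0).foldl (fun best p =>
      if p.2 ≤ 0 then best
      else
        let light := PySem.List.pyGetD ext p.1 0 + (p.2 - 1) + exercise_time
        let cnt : Int := (pyBisectRight ext (light - 1) p.1.toNat (p.1.toNat + n + 1) : Int) - p.1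
        max best (min cnt (n : Int))) 0

-- ===== PRECONDITION & SPEC =====
def Spec_solution (exercise_list : List Int) (exercise_time : Int) (out : Int) : Prop := out = solution_alt exercise_list exercise_time
instance (exercise_list : List Int) (exercise_time : Int) (out : Int) : Decidable (Spec_solution exercise_list exercise_time out) := by unfold Spec_solution; infer_instance

-- ===== CLAIM (what is proved, stated in full; the proofs are below) =====
def Claim_equal_solution : Prop := ∀ (exercise_list : List Int) (exercise_time : Int), Dom_solution exercise_list exercise_time → Spec_solution exercise_list exercise_time (solution exercise_list exercise_time)

-- ===== LEMMAS AND PROOFS =====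
theorem pyBisectRight_eq (a : List Int) (x : Int) (lo hi : Nat) :
    pyBisectRight a x lo hi =
      if lo < hi then
        (if x < a.getD ((lo + hi) / 2) 0 then pyBisectRight a x lo ((lo + hi) / 2)
         else pyBisectRight a x ((lo + hi) / 2 + 1) hi)
      else lo := by
  conv_lhs => rw [pyBisectRight]
  split <;> rfl

theorem pyBisectRight_bounds (a : List Int) (x : Int) :
    ∀ (d lo hi : Nat), hi - lo ≤ d → lo ≤ hi →
    lo ≤ pyBisectRight a x lo hi ∧ pyBisectRight a x lo hi ≤ hi := by
  intro d
  induction d with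
  | zero =>
    intro lo hi h1 h2
    rw [pyBisectRight_eq]
    have hnl : ¬ lo < hi := by omega
    simp only [if_neg hnl]
    omega
  | succ d ih =>
    intro lo hi h1 h2
    rw [pyBisectRight_eq]
    by_cases hlt : lo < hi
    · simp only [if_pos hlt]
      by_cases hx : x < a.getD ((lo + hi) / 2) 0
      · simp only [if_pos hx]
        have := ih lo ((lo + hi) / 2) (by omega) (by omega)
        omega
      · simp only [if_neg hx]
        have := ih ((lo + hi) / 2 + 1) hi (by omega) (by omega)
        omega
    · simp only [if_neg hlt]
      omega

theorem pyBisectRight_mono (a : List Int) (x y : Int) (hxy : x ≤ y) :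
    ∀ (d lo hi : Nat), hi - lo ≤ d →
    pyBisectRight a x lo hi ≤ pyBisectRight a y lo hi := by
  intro d
  induction d with
  | zero =>
    intro lo hi h1
    have hnl : ¬ lo < hi := by omega
    conv_lhs => rw [pyBisectRight_eq]
    conv_rhs => rw [pyBisectRight_eq]
    simp [hnl]
  | succ d ih =>
    intro lo hi h1
    by_cases hlt : lo < hi
    · conv_lhs => rw [pyBisectRight_eq]
      conv_rhs => rw [pyBisectRight_eq]
      simp only [if_pos hlt]
      by_cases hy : y < a.getD ((lo + hi) / 2) 0
      · have hx : x < a.getD ((lo + hi) / 2) 0 := lt_of_le_of_lt hxy hy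
        simp only [if_pos hx, if_pos hy]
        exact ih lo ((lo + hi) / 2) (by omega)
      · by_cases hx : x < a.getD ((lo + hi) / 2) 0
        · simp only [if_pos hx, if_neg hy]
          have h1' := pyBisectRight_bounds a x ((lo + hi) / 2 - lo) lo ((lo + hi) / 2) (by omega) (by omega)
          have h2' := pyBisectRight_bounds a y (hi - ((lo + hi) / 2 + 1)) ((lo + hi) / 2 + 1) hi (by omega) (by omega)
          omega
        · simp only [if_neg hx, if_neg hy]
          exact ih ((lo + hi) / 2 + 1) hi (by omega)
    · conv_lhs => rw [pyBisectRight_eq]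
      conv_rhs => rw [pyBisectRight_eq]
      simp [hlt]

theorem getD_drop_take (a : List Int) (i k m : Nat) (hm : m < k) :
    ((a.drop i).take k).getD m 0 = a.getD (i + m) 0 := by
  rw [List.getD_eq_getElem?_getD, List.getD_eq_getElem?_getD]
  rw [List.getElem?_take_of_lt hm, List.getElem?_drop]

theorem pyBisectRight_shift (a : List Int) (x : Int) (i k : Nat) :
    ∀ (d lo hi : Nat), hi - lo ≤ d → hi ≤ k →
    pyBisectRight a x (i + lo) (i + hi) = i + pyBisectRight ((a.drop i).take k) x lo hi := by
  intro d
  induction d with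
  | zero =>
    intro lo hi h1 h2
    have hnl : ¬ lo < hi := by omega
    have hnl' : ¬ i + lo < i + hi := by omega
    conv_lhs => rw [pyBisectRight_eq]
    conv_rhs => rw [pyBisectRight_eq]
    simp [hnl, hnl']
  | succ d ih =>
    intro lo hi h1 h2
    by_cases hlt : lo < hi
    · have hlt' : i + lo < i + hi := by omega
      have hmid : (i + lo + (i + hi)) / 2 = i + (lo + hi) / 2 := by omega
      conv_lhs => rw [pyBisectRight_eq]
      conv_rhs => rw [pyBisectRight_eq]
      simp only [if_pos hlt, if_pos hlt', hmid,
        getD_drop_take a i k ((lo + hi) / 2) (by omega : (lo + hi) / 2 < k)]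
      by_cases hx : x < a.getD (i + (lo + hi) / 2) 0
      · simp only [if_pos hx]
        exact ih lo ((lo + hi) / 2) (by omega) (by omega)
      · simp only [if_neg hx]
        have harg : i + (lo + hi) / 2 + 1 = i + ((lo + hi) / 2 + 1) := by omega
        rw [harg]
        exact ih ((lo + hi) / 2 + 1) hi (by omega) (by omega)
    · have hnl' : ¬ i + lo < i + hi := by omega
      conv_lhs => rw [pyBisectRight_eq]
      conv_rhs => rw [pyBisectRight_eq]
      simp [hlt, hnl']

theorem length_foldl_set {α : Type} (xs : List α) (f : α → Nat) (g : List Int → α → Int) (e : List Int) :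
    (xs.foldl (fun e i => e.set (f i) (g e i)) e).length = e.length := by
  induction xs generalizing e with
  | nil => rfl
  | cons a xs ih => rw [List.foldl_cons, ih, List.length_set]

theorem length_buildExt (l : List Int) (total : Int) :
    (buildExt l total).length = 2 * l.length + 1 := by
  simp only [buildExt]
  rw [length_foldl_set (List.range' (l.length + 1) l.length) (fun i => i)
      (fun e i => e.getD (i - l.length) 0 + total),
    length_foldl_set (List.range l.length) (fun i => i + 1)
      (fun e i => e.getD i 0 + l.getD i 0)]
  simp

theorem bisect_slice (ext : List Int) (x : Int) (i n : Nat) (hle : i ≤ n)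
    (hlen : ext.length = 2 * n + 1) :
    ((pyBisectRight (PySem.List.slice ext (some (i : Int)) (some ((i : Int) + ((n : Int) + 1)))) x 0
        (PySem.List.slice ext (some (i : Int)) (some ((i : Int) + ((n : Int) + 1)))).length : Nat) : Int)
      = (pyBisectRight ext x i (i + n + 1) : Int) - (i : Int) := by
  have hc : (i : Int) + ((n : Int) + 1) = (i : Int) + ((n + 1 : Nat) : Int) := by push_cast; ring
  rw [hc, PySem.List.slice_natCast_add]
  have hslen : ((ext.drop i).take (n + 1)).length = n + 1 := by
    simp [hlen]; omega
  rw [hslen]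
  have hshift := pyBisectRight_shift ext x i (n + 1) (n + 1) 0 (n + 1) (by omega) (by omega)
  have harg : i + (n + 1) = i + n + 1 := by omega
  rw [harg] at hshift
  simp only [Nat.add_zero] at hshift
  rw [hshift]
  push_cast
  ring

def cntG (ext : List Int) (ex t : Int) (n i : Nat) (off : Int) : Int :=
  min ((pyBisectRight ext (ex + off + t - 1) i (i + n + 1) : Int) - (i : Int)) (n : Int)

theorem foldl_max_fix (g : Int → Int) (c : Int) (h : ∀ off, g off ≤ c) :
    ∀ offs : List Int, offs.foldl (fun m off => max m (g off)) c = c := by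
  intro offs
  induction offs with
  | nil => rfl
  | cons o os ih => rw [List.foldl_cons, max_eq_left (h o), ih]

theorem inner_eq_foldl (ext : List Int) (i n : Nat) (ex t : Int) (hin : i ≤ n)
    (hlen : ext.length = 2 * n + 1) :
    ∀ (offs : List Int) (m : Int), m ≤ (n : Int) →
    solutionInner ext i n ex t offs m
      = offs.foldl (fun m off => max m (cntG ext ex t n i off)) m := by
  intro offs
  induction offs with
  | nil => intro m _; rfl
  | cons off offs ih =>
    intro m hm
    rw [List.foldl_cons]
    simp only [solutionInner]
    rw [bisect_slice ext (ex + off + t - 1) i n hin hlen]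
    have hbnd := pyBisectRight_bounds ext (ex + off + t - 1) (n + 1) i (i + n + 1) (by omega) (by omega)
    set b := pyBisectRight ext (ex + off + t - 1) i (i + n + 1) with hbdef
    have hC : (if ((if ((b : Int) - (i : Int) + (i : Int) - 1 > (i : Int) + (n : Int)) then ((i : Int) + (n : Int)) else ((b : Int) - (i : Int) + (i : Int) - 1)) - (i : Int) + 1 > (n : Int)) then ((n : Int)) else ((if ((b : Int) - (i : Int) + (i : Int) - 1 > (i : Int) + (n : Int)) then ((i : Int) + (n : Int)) else ((b : Int) - (i : Int) + (i : Int) - 1)) - (i : Int) + 1))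
        = cntG ext ex t n i off := by
      unfold cntG
      rw [← hbdef]
      split_ifs <;> omega
    rw [hC]
    by_cases hbr : max m (cntG ext ex t n i off) = (n : Int)
    · rw [if_pos hbr, hbr]
      rw [foldl_max_fix (fun off => cntG ext ex t n i off) (n : Int)
        (fun o => min_le_right _ _) offs]
    · rw [if_neg hbr]
      exact ih _ (by
        have := min_le_right ((pyBisectRight ext (ex + off + t - 1) i (i + n + 1) : Int) - (i : Int)) ((n : Int))
        unfold cntG
        omega)

theorem cntG_mono (ext : List Int) (ex t : Int) (n i : Nat) (u v : Int) (huv : u ≤ v) :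
    cntG ext ex t n i u ≤ cntG ext ex t n i v := by
  unfold cntG
  have := pyBisectRight_mono ext (ex + u + t - 1) (ex + v + t - 1) (by omega) (i + n + 1) i (i + n + 1) (by omega)
  omega

theorem foldl_max_pyRange (g : Int → Int) (mono : ∀ u v, u ≤ v → g u ≤ g v) :
    ∀ (k : Nat), 1 ≤ k → ∀ m : Int,
    (PySem.List.pyRange 0 (k : Int) 1).foldl (fun m off => max m (g off)) m
      = max m (g ((k : Int) - 1)) := by
  intro k
  induction k with
  | zero => intro h; omega
  | succ k ih =>
    intro _ m
    by_cases hk : 1 ≤ k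
    · have hcast : ((k + 1 : Nat) : Int) = (k : Int) + 1 := by push_cast; ring
      rw [hcast, PySem.List.pyRange_one_succ_right (by positivity)]
      rw [List.foldl_append, List.foldl_cons, List.foldl_nil]
      rw [ih hk]
      have hmono := mono ((k : Int) - 1) (k : Int) (by omega)
      simp only [add_sub_cancel_right]
      omega
    · have hk0 : k = 0 := by omega
      subst hk0
      have hone : ((1 : Nat) : Int) = 0 + 1 := by norm_num
      rw [hone, PySem.List.pyRange_one_singleton, List.foldl_cons, List.foldl_nil]
      norm_num

theorem outer_step_fix (l ext : List Int) (t : Int) (n : Nat) :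
    ∀ is : List Nat,
    is.foldl (fun m i => if l.getD i 0 ≤ 0 then m
      else max m (cntG ext (ext.getD i 0) t n i (l.getD i 0 - 1))) ((n : Int)) = (n : Int) := by
  intro is
  induction is with
  | nil => rfl
  | cons i is ih =>
    rw [List.foldl_cons]
    by_cases h : l.getD i 0 ≤ 0
    · rw [if_pos h, ih]
    · have hle : cntG ext (ext.getD i 0) t n i (l.getD i 0 - 1) ≤ ((n : Nat) : Int) :=
        min_le_right _ _
      rw [if_neg h, max_eq_left hle, ih]

theorem outer_eq_foldl (l ext : List Int) (t : Int) (n : Nat)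
    (hlen : ext.length = 2 * n + 1) :
    ∀ (is : List Nat) (m : Int), (∀ i ∈ is, i < n) → m ≤ (n : Int) →
    solutionOuter l ext t n is m
      = is.foldl (fun m i => if l.getD i 0 ≤ 0 then m
          else max m (cntG ext (ext.getD i 0) t n i (l.getD i 0 - 1))) m := by
  intro is
  induction is with
  | nil => intro m _ _; rfl
  | cons i is ih =>
    intro m hmem hm
    have hin : i < n := hmem i (List.mem_cons_self)
    rw [List.foldl_cons]
    simp only [solutionOuter]
    rw [inner_eq_foldl ext i n (ext.getD i 0) t (le_of_lt hin) hlen _ m hm]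
    by_cases hpos : l.getD i 0 ≤ 0
    · rw [PySem.List.pyRange_one_eq_nil (by omega), List.foldl_nil]
      rw [if_pos hpos]
      by_cases hbr : m = (n : Int)
      · rw [if_pos hbr, hbr]
        rw [outer_step_fix]
      · rw [if_neg hbr]
        exact ih m (fun j hj => hmem j (List.mem_cons_of_mem _ hj)) hm
    · have hk : l.getD i 0 = ((l.getD i 0).toNat : Int) := by omega
      have hk1 : 1 ≤ (l.getD i 0).toNat := by omega
      rw [hk, foldl_max_pyRange (cntG ext (ext.getD i 0) t n i)
        (cntG_mono ext (ext.getD i 0) t n i) _ hk1 m]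
      rw [← hk, if_neg hpos]
      have hval : max m (cntG ext (ext.getD i 0) t n i (l.getD i 0 - 1)) ≤ (n : Int) := by
        have := min_le_right ((pyBisectRight ext (ext.getD i 0 + (l.getD i 0 - 1) + t - 1) i (i + n + 1) : Int) - (i : Int)) ((n : Int))
        unfold cntG
        omega
      by_cases hbr : max m (cntG ext (ext.getD i 0) t n i (l.getD i 0 - 1)) = (n : Int)
      · rw [if_pos hbr, hbr, outer_step_fix]
      · rw [if_neg hbr]
        exact ih _ (fun j hj => hmem j (List.mem_cons_of_mem _ hj)) hval

theorem solution_eq_alt (l : List Int) (t : Int) : solution l t = solution_alt l t := by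
  unfold solution solution_alt
  by_cases hge : t ≥ l.sum
  · simp only [ge_iff_le, if_pos hge]
  · simp only [ge_iff_le, if_neg hge]
    rw [outer_eq_foldl l (buildExt l l.sum) t l.length
      (by rw [length_buildExt]) (List.range l.length) 0
      (fun i h => List.mem_range.mp h) (by positivity)]
    rw [PySem.List.enumerate_eq_map_pyRange l 0, List.foldl_map]
    have hlen : PySem.List.len l = ((l.length : Nat) : Int) := by simp [PySem.List.len_eq]
    rw [hlen, PySem.List.pyRange_zero_nat, List.foldl_map]
    apply PySem.List.foldl_congr_mem
    intro b i hi
    simp only [PySem.List.pyGetD_natCast, Int.toNat_natCast]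
    by_cases hpos : l.getD i 0 ≤ 0
    · rw [if_pos hpos, if_pos hpos]
    · rw [if_neg hpos, if_neg hpos]
      unfold cntG
      rfl

-- ===== VERDICT (by name: the statement is the Claim_ definition above) =====
theorem solution_spec : Claim_equal_solution := by
  intro exercise_list exercise_time _
  unfold Spec_solution
  exact solution_eq_alt exercise_list exercise_time
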